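-- pv_equiv track=rewrite | github.com/PugalendiArumugam/LeetcodeProblemsPython | partition_string.py | partitionString3
-- ===== SOURCE A (Python) =====
-- from typing import List
--
-- def partitionString3(s: str) -> List[str]:
--     # build a set to store the string
--     # if string in set, add more char into string and check again
--     # i wonderd if it is posible that we can't add the string
--     # i mean like input s="aaaa"
--     # output="a", "aa" and we just drop the last a
--
--     bucket = set()
--     res = []
--     prefix = ""
--
--     for char in s:
--         prefix += char
--         if prefix not in bucket:
--             bucket.add(prefix)
--             res.append(prefix)
--             prefix = ""
--
--     return res
-- ===== SOURCE B (Python) =====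
-- def partitionString3(s: str):
--     # Trie over the emitted pieces, edges in one flat dict keyed by (node, char).
--     # Descend one edge per character; a missing edge means the current substring
--     # is new: create the node, emit s[start:i+1] by slicing, restart at the root.
--     # No growing prefix string is maintained or hashed.
--     # Correct because A's bucket is prefix-closed (every proper prefix of an
--     # emitted piece was already in the bucket), so "prefix in bucket" is exactly
--     # "the trie path for prefix exists".
--     children = {}
--     next_id = 1
--     res = []
--     node = 0
--     start = 0
--     for i, ch in enumerate(s):
--         nxt = children.get((node, ch))
--         if nxt is None:
--             children[(node, ch)] = next_id
--             next_id += 1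
--             res.append(s[start:i + 1])
--             node = 0
--             start = i + 1
--         else:
--             node = nxt
--     return res
-- ===== Notes on version B (the rewrite author's own statement) =====
-- stated objective: alternative
-- what changed: A keeps a set of emitted pieces and re-checks a growing prefix string per character; B builds a trie over the emitted pieces (flat dict keyed by (node, char)), descends one edge per character and emits a slice when an edge is missing, trading string hashing for per-edge dict steps (O(n) edge steps vs O(n^1.5) worst-case character-hashing in A).
import Mathlib
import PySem

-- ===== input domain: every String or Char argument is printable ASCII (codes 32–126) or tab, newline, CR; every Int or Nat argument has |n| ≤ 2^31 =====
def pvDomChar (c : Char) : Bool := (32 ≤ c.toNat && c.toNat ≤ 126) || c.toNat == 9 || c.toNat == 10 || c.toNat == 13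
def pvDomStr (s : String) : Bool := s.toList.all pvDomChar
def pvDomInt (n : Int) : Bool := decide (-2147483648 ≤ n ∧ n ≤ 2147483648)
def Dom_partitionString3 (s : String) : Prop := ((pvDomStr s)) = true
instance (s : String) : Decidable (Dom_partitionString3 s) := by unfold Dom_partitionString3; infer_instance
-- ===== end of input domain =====

-- B replaces A's set of emitted pieces (a growing prefix string re-checked per character) by a trie
-- over the emitted pieces kept as a flat dict keyed by (node, char): one edge step per character,
-- a missing edge emits the slice and restarts at the root. Objective: alternative data structure.

-- ===== PORT A =====
-- loop body of A: state = (bucket, res, prefix)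
def pvStepA (st : PySem.Set String × List String × String) (char : Char) :
    PySem.Set String × List String × String :=
  let pfx := st.2.2.push char
  if PySem.Set.contains st.1 pfx then (st.1, st.2.1, pfx)
  else (PySem.Set.add st.1 pfx, st.2.1 ++ [pfx], "")

def partitionString3 (s : String) : List String :=
  (s.toList.foldl pvStepA (PySem.Set.empty, [], "")).2.1

-- ===== PORT B =====
-- loop body of B: state = (children, next_id, res, node, start); p = (i, ch) from enumerate(s)
def pvStepB (s : String)
    (st : PySem.Dict (Int × Char) Int × Int × List String × Int × Int) (p : Int × Char) :
    PySem.Dict (Int × Char) Int × Int × List String × Int × Int :=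
  match st, p with
  | (children, nextId, res, node, start), (i, ch) =>
    match children.get? (node, ch) with
    | none =>
        (children.insert (node, ch) nextId, nextId + 1,
         res ++ [PySem.Str.slice s (some start) (some (i + 1))], 0, i + 1)
    | some nxt => (children, nextId, res, nxt, start)

def partitionString3_alt (s : String) : List String :=
  ((PySem.List.enumerate s.toList 0).foldl (pvStepB s)
    (PySem.Dict.empty, 1, [], 0, 0)).2.2.1

-- ===== PRECONDITION & SPEC =====
def Spec_partitionString3 (s : String) (out : List String) : Prop := out = partitionString3_alt s
instance (s : String) (out : List String) : Decidable (Spec_partitionString3 s out) := by unfold Spec_partitionString3; infer_instance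

-- ===== CLAIM (what is proved, stated in full; the proofs are below) =====
def Claim_equal_partitionString3 : Prop := ∀ (s : String), Dom_partitionString3 s → Spec_partitionString3 s (partitionString3 s)

-- ===== LEMMAS AND PROOFS =====

-- the node reached from n by following u edge by edge in the trie d
def pvDescend (d : PySem.Dict (Int × Char) Int) : Int → List Char → Option Int
  | n, [] => some n
  | n, c :: cs =>
    match d.get? (n, c) with
    | none => none
    | some m => pvDescend d m cs

theorem pvDescend_single (d : PySem.Dict (Int × Char) Int) (n : Int) (c : Char) :
    pvDescend d n [c] = d.get? (n, c) := by
  cases h : d.get? (n, c) <;> simp [pvDescend, h]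

theorem pvDescend_append (d : PySem.Dict (Int × Char) Int) (u v : List Char) :
    ∀ n, pvDescend d n (u ++ v) = (pvDescend d n u).bind (fun m => pvDescend d m v) := by
  induction u with
  | nil => intro n; simp [pvDescend]
  | cons c cs ih =>
      intro n
      simp only [List.cons_append, pvDescend]
      cases h : d.get? (n, c) <;> simp [ih]

theorem pvDescend_vals (d : PySem.Dict (Int × Char) Int) (u : List Char) :
    ∀ n m, pvDescend d n u = some m → m = n ∨ ∃ p, (p, m) ∈ d.items := by
  induction u with
  | nil => intro n m h; simp [pvDescend] at h; exact Or.inl h.symm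
  | cons c cs ih =>
      intro n m h
      simp only [pvDescend] at h
      cases hg : d.get? (n, c) with
      | none => rw [hg] at h; simp at h
      | some t =>
          rw [hg] at h
          rcases ih t m h with rfl | hv
          · exact Or.inr ⟨(n, c), PySem.Dict.mem_items_of_get?_eq_some d hg⟩
          · exact Or.inr hv

-- the simulation invariant between B's (trie, next_id) and A's bucket
def pvInv (d : PySem.Dict (Int × Char) Int) (nid : Int) (bucket : PySem.Set String) : Prop :=
  0 < nid ∧
  (∀ p v, (p, v) ∈ d.items → p.1 < nid ∧ 1 ≤ v ∧ v < nid) ∧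
  (∀ u v n, pvDescend d 0 u = some n → pvDescend d 0 v = some n → u = v) ∧
  (∀ t : String, t.toList ≠ [] → ((pvDescend d 0 t.toList).isSome = true ↔ t ∈ bucket))

theorem pvDescend_lt (d : PySem.Dict (Int × Char) Int) (nid : Int)
    (hb : ∀ p v, (p, v) ∈ d.items → p.1 < nid ∧ 1 ≤ v ∧ v < nid) (hpos : 0 < nid)
    {u : List Char} {m : Int} (h : pvDescend d 0 u = some m) : m < nid := by
  rcases pvDescend_vals d u 0 m h with rfl | ⟨p, hp⟩
  · exact hpos
  · exact (hb p m hp).2.2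

-- inserting the one missing edge extends pvDescend by exactly the string pfx ++ [c]
theorem pvDescend_insert (d : PySem.Dict (Int × Char) Int) (nid node : Int) (c : Char)
    (pfx : List Char)
    (hpos : 0 < nid)
    (hb : ∀ p v, (p, v) ∈ d.items → p.1 < nid ∧ 1 ≤ v ∧ v < nid)
    (hinj : ∀ u v n, pvDescend d 0 u = some n → pvDescend d 0 v = some n → u = v)
    (hnode : pvDescend d 0 pfx = some node)
    (hmiss : d.get? (node, c) = none) :
    ∀ u, pvDescend (d.insert (node, c) nid) 0 u =
      if u = pfx ++ [c] then some nid else pvDescend d 0 u := by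
  have hnode_lt : node < nid := pvDescend_lt d nid hb hpos hnode
  have hget' : ∀ (m : Int) (e : Char), (d.insert (node, c) nid).get? (m, e) =
      if (m, e) = (node, c) then some nid else d.get? (m, e) := by
    intro m e; exact PySem.Dict.get?_insert d (node, c) (m, e) nid
  intro u
  induction u using List.reverseRecOn with
  | nil =>
      rw [if_neg (by simp)]
      simp [pvDescend]
  | append_singleton v e ih =>
      rw [pvDescend_append, ih]
      by_cases hv : v = pfx ++ [c]
      · rw [if_pos hv]
        -- nid has no outgoing edges, and pfx ++ [c] is a dead end in d
        have hdead : (d.insert (node, c) nid).get? (nid, e) = none := by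
          rw [hget']
          rw [if_neg (by simp; omega)]
          cases hg : d.get? (nid, e) with
          | none => rfl
          | some w =>
              have := (hb (nid, e) w (PySem.Dict.mem_items_of_get?_eq_some d hg)).1
              omega
        have hne : v ++ [e] ≠ pfx ++ [c] := by
          subst hv; intro h
          have := congrArg List.length h; simp at this
        rw [if_neg hne]
        rw [pvDescend_append, hv, pvDescend_append, hnode]
        simp [hdead, pvDescend_single, hmiss]
      · rw [if_neg hv]
        cases hd : pvDescend d 0 v with
        | none =>
            have hne : v ++ [e] ≠ pfx ++ [c] := by
              intro h
              rcases List.append_inj' h rfl with ⟨rfl, he⟩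
              rw [hnode] at hd; simp at hd
            rw [if_neg hne]
            rw [pvDescend_append, hd]
            simp
        | some m =>
            simp only [Option.bind_some, pvDescend_single, hget']
            by_cases hmc : (m, e) = (node, c)
            · have hm : m = node := (Prod.mk.injEq _ _ _ _ ▸ hmc).1
              have he : e = c := (Prod.mk.injEq _ _ _ _ ▸ hmc).2
              have : v = pfx := hinj v pfx m hd (hm ▸ hnode)
              rw [if_pos hmc, if_pos (by rw [this, he])]
            · rw [if_neg hmc]
              have hne : v ++ [e] ≠ pfx ++ [c] := by
                intro h
                rcases List.append_inj' h rfl with ⟨rfl, he⟩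
                simp at he
                rw [hnode] at hd
                exact hmc (by rw [Option.some.injEq] at hd; rw [hd, he])
              rw [if_neg hne, pvDescend_append, hd, Option.bind_some, pvDescend_single]

theorem pvInv_insert (d : PySem.Dict (Int × Char) Int) (nid node : Int) (c : Char)
    (P : String) (bucket : PySem.Set String)
    (hinv : pvInv d nid bucket)
    (hnode : pvDescend d 0 P.toList = some node)
    (hmiss : d.get? (node, c) = none) :
    pvInv (d.insert (node, c) nid) (nid + 1) (PySem.Set.add bucket (P.push c)) := by
  obtain ⟨hpos, hb, hinj, hmem⟩ := hinv
  have hnode_lt : node < nid := pvDescend_lt d nid hb hpos hnode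
  have hchar : ∀ u, pvDescend (d.insert (node, c) nid) 0 u =
      if u = P.toList ++ [c] then some nid else pvDescend d 0 u :=
    pvDescend_insert d nid node c P.toList hpos hb hinj hnode hmiss
  have hitems : (d.insert (node, c) nid).items = d.items ++ [((node, c), nid)] := by
    apply PySem.Dict.items_insert_of_not_contains
    rw [PySem.Dict.contains_eq_isSome_get?, hmiss]; rfl
  have hpushc : (P.push c).toList = P.toList ++ [c] := by simp
  refine ⟨by omega, ?_, ?_, ?_⟩
  · intro p v hp
    rw [hitems] at hp
    rcases List.mem_append.mp hp with h | h
    · have := hb p v h; omega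
    · simp at h
      obtain ⟨rfl, rfl⟩ := h
      simp; omega
  · intro u v n hu hv
    rw [hchar] at hu hv
    by_cases h1 : u = P.toList ++ [c] <;> by_cases h2 : v = P.toList ++ [c]
    · rw [h1, h2]
    · rw [if_pos h1] at hu; rw [if_neg h2] at hv
      have hn : nid = n := Option.some.inj hu
      subst hn
      exact absurd (pvDescend_lt d nid hb hpos hv) (lt_irrefl nid)
    · rw [if_neg h1] at hu; rw [if_pos h2] at hv
      have hn : nid = n := Option.some.inj hv
      subst hn
      exact absurd (pvDescend_lt d nid hb hpos hu) (lt_irrefl nid)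
    · rw [if_neg h1] at hu; rw [if_neg h2] at hv
      exact hinj u v n hu hv
  · intro t ht
    rw [hchar]
    by_cases h : t.toList = P.toList ++ [c]
    · have : t = P.push c := by
        apply String.ext  -- equal codepoint lists
        rw [h, hpushc]
      rw [if_pos h, this]
      simp [PySem.Set.mem_add]
    · have hne : t ≠ P.push c := by
        intro he; exact h (by rw [he, hpushc])
      rw [if_neg h, PySem.Set.mem_add]
      rw [hmem t ht]
      simp [hne]

-- the main simulation: from matching mid-loop states the two folds produce the same res
theorem pvSim (s : String) (rest : List Char) :
    ∀ (k st : Nat) (bucket : PySem.Set String) (res : List String) (P : String)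
      (d : PySem.Dict (Int × Char) Int) (nid node : Int),
    s.toList.drop k = rest →
    st ≤ k →
    P.toList = (s.toList.drop st).take (k - st) →
    pvDescend d 0 P.toList = some node →
    pvInv d nid bucket →
    (rest.foldl pvStepA (bucket, res, P)).2.1 =
      ((PySem.List.enumerate rest (k : Int)).foldl (pvStepB s) (d, nid, res, node, (st : Int))).2.2.1 := by
  induction rest with
  | nil => intro k st bucket res P d nid node _ _ _ _ _; simp [PySem.List.enumerate]
  | cons c rest' ih =>
      intro k st bucket res P d nid node hdrop hst hP hnode hinv
      obtain ⟨hpos, hb, hinj, hmem⟩ := hinv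
      have hklen : k < s.toList.length := by
        by_contra h
        rw [List.drop_eq_nil_of_le (by omega)] at hdrop
        simp at hdrop
      have hgetk : s.toList[k]? = some c := by
        have : (s.toList.drop k)[0]? = some c := by rw [hdrop]; rfl
        rwa [List.getElem?_drop, Nat.add_zero] at this
      have hdrop' : s.toList.drop (k + 1) = rest' := by
        have : s.toList.drop (k + 1) = (s.toList.drop k).drop 1 := by
          rw [List.drop_drop]
        rw [this, hdrop]; rfl
      have hPc : (P.push c).toList = (s.toList.drop st).take (k + 1 - st) := by
        have h1 : k + 1 - st = (k - st) + 1 := by omega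
        rw [h1, List.take_add_one]
        have h2 : (s.toList.drop st)[k - st]? = some c := by
          rw [List.getElem?_drop]
          rw [show st + (k - st) = k by omega, hgetk]
        simp [hP, h2]
      have hdesc : pvDescend d 0 (P.push c).toList = d.get? (node, c) := by
        have : (P.push c).toList = P.toList ++ [c] := by simp
        rw [this, pvDescend_append, hnode, Option.bind_some, pvDescend_single]
      rw [PySem.List.enumerate_cons]
      simp only [List.foldl_cons]
      cases hg : d.get? (node, c) with
      | some m =>
          -- edge exists ⇒ prefix already in bucket: both loops continue
          have hmemb : P.push c ∈ bucket := by
            rw [← hdesc] at hg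
            have : (pvDescend d 0 (P.push c).toList).isSome = true := by rw [hg]; rfl
            exact (hmem (P.push c) (by simp)).mp this
          have hstepA : pvStepA (bucket, res, P) c = (bucket, res, P.push c) := by
            simp [pvStepA, hmemb]
          have hstepB : pvStepB s (d, nid, res, node, (st : Int)) ((k : Int), c) =
              (d, nid, res, m, (st : Int)) := by
            simp [pvStepB, hg]
          rw [hstepA, hstepB]
          have hnode' : pvDescend d 0 (P.push c).toList = some m := by rw [hdesc, hg]
          have hcast : (k : Int) + 1 = ((k + 1 : Nat) : Int) := by push_cast; ring
          rw [hcast]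
          exact ih (k + 1) st bucket res (P.push c) d nid m hdrop' (by omega) hPc hnode'
            ⟨hpos, hb, hinj, hmem⟩
      | none =>
          -- missing edge ⇒ prefix is new: both loops emit and reset
          have hnm : P.push c ∉ bucket := by
            rw [← hdesc] at hg
            have hnone : (pvDescend d 0 (P.push c).toList).isSome = false := by rw [hg]; rfl
            intro hin
            have := (hmem (P.push c) (by simp)).mpr hin
            rw [hnone] at this; exact Bool.noConfusion this
          have hstepA : pvStepA (bucket, res, P) c =
              (PySem.Set.add bucket (P.push c), res ++ [P.push c], "") := by
            simp [pvStepA, hnm]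
          have hslice : PySem.Str.slice s (some (st : Int)) (some ((k : Int) + 1)) = P.push c := by
            apply String.ext
            have hcast : (k : Int) + 1 = ((k + 1 : Nat) : Int) := by push_cast; ring
            rw [hcast]
            rw [PySem.Str.toList_slice, PySem.Chars.slice_eq_listSlice,
              PySem.List.slice_natCast, hPc]
          have hstepB : pvStepB s (d, nid, res, node, (st : Int)) ((k : Int), c) =
              (d.insert (node, c) nid, nid + 1, res ++ [P.push c], 0, (k : Int) + 1) := by
            simp [pvStepB, hg, hslice]
          rw [hstepA, hstepB]
          have hinv' : pvInv (d.insert (node, c) nid) (nid + 1)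
              (PySem.Set.add bucket (P.push c)) :=
            pvInv_insert d nid node c P bucket ⟨hpos, hb, hinj, hmem⟩ hnode hg
          have hcast : (k : Int) + 1 = ((k + 1 : Nat) : Int) := by push_cast; ring
          rw [hcast]
          exact ih (k + 1) (k + 1) (PySem.Set.add bucket (P.push c)) (res ++ [P.push c]) ""
            (d.insert (node, c) nid) (nid + 1) 0 hdrop' (by omega) (by simp)
            (by simp [pvDescend]) hinv'

theorem pvInv_empty : pvInv PySem.Dict.empty 1 PySem.Set.empty := by
  refine ⟨by omega, ?_, ?_, ?_⟩
  · intro p v hp; simp [PySem.Dict.empty] at hp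
  · intro u v n hu hv
    cases u with
    | nil =>
        cases v with
        | nil => rfl
        | cons e es => simp [pvDescend, PySem.Dict.get?_empty] at hv
    | cons e es => simp [pvDescend, PySem.Dict.get?_empty] at hu
  · intro t ht
    cases hc : t.toList with
    | nil => exact absurd hc ht
    | cons e es =>
        simp [pvDescend, PySem.Dict.get?_empty, PySem.Set.empty]

-- ===== VERDICT (by name: the statement is the Claim_ definition above) =====
theorem partitionString3_spec : Claim_equal_partitionString3 := by
  intro s _
  unfold Spec_partitionString3 partitionString3 partitionString3_alt
  have := pvSim s s.toList 0 0 PySem.Set.empty [] "" PySem.Dict.empty 1 0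
    (by simp) (by omega) (by simp) (by simp [pvDescend]) pvInv_empty
  simpa using this
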